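-- pv_equiv track=rewrite | github.com/astrovsky01/genome-deduplication | code/dedup0.py | condense_masked_regions
-- ===== SOURCE A (Python) =====
-- def condense_masked_regions(masked):
--     masked_regions = []
--     if len(masked) == 0:
--         return masked_regions
--     region_start = masked[0]
--     for i in range(len(masked)-1):
--         if masked[i] + 1 != masked[i+1]:
--             masked_regions.append((region_start, masked[i] + 1))
--             region_start = masked[i+1]
--     masked_regions.append((region_start, masked[-1] + 1))
--     return masked_regions
-- ===== SOURCE B (Python) =====
-- from itertools import groupby
--
-- def condense_masked_regions(masked):
--     groups = [list(g) for _, g in groupby(enumerate(masked), key=lambda t: t[1] - t[0])]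
--     return [(g[0][1], g[-1][1] + 1) for g in groups]
-- ===== Notes on version B (the rewrite author's own statement) =====
-- stated objective: idiomatic
-- what changed: Replaces the index-based adjacent-difference scan (range(len-1) with masked[i]/masked[i+1] lookups and a mutable region_start) by itertools.groupby over enumerate(masked) keyed on value-minus-index, which is constant exactly across a consecutive run; each group directly yields (first value, last value + 1).
import Mathlib
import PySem

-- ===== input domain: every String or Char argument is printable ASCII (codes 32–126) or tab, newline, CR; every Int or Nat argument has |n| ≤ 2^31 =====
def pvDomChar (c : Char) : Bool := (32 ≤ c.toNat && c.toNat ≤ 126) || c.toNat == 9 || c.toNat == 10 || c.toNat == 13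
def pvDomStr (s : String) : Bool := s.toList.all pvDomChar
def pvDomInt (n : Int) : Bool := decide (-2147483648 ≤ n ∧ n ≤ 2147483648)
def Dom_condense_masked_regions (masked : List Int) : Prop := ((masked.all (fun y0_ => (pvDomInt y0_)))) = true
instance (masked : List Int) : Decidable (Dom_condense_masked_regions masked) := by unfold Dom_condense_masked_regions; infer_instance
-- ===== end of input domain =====

-- B replaces A's index-based adjacent-difference scan by grouping enumerate(masked) on
-- the value-minus-index key (itertools.groupby), mapping each run to (first, last+1): idiomatic, same O(n) cost.

-- ===== PORT A =====
def condense_masked_regions (masked : List Int) : List (Int × Int) :=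
  let masked_regions : List (Int × Int) := []
  if masked.length = 0 then masked_regions
  else
    let region_start : Int := PySem.List.pyGetD masked 0 0
    let st := (PySem.List.pyRange 0 ((masked.length : Int) - 1) 1).foldl
      (fun (st : Int × List (Int × Int)) (i : Int) =>
        if PySem.List.pyGetD masked i 0 + 1 ≠ PySem.List.pyGetD masked (i + 1) 0
        then (PySem.List.pyGetD masked (i + 1) 0, st.2 ++ [(st.1, PySem.List.pyGetD masked i 0 + 1)])
        else st)
      (region_start, masked_regions)
    st.2 ++ [(st.1, PySem.List.pyGetD masked (-1) 0 + 1)]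

-- ===== PORT B =====
-- itertools.groupby on consecutive equal keys (key t = t.2 - t.1), ported as structural recursion
def pvGlue (x : Int × Int) : List (List (Int × Int)) → List (List (Int × Int))
  | (y :: ys) :: gs =>
    if x.2 - x.1 = y.2 - y.1 then (x :: y :: ys) :: gs
    else [x] :: (y :: ys) :: gs
  | gs => [x] :: gs

def pvGroupBy : List (Int × Int) → List (List (Int × Int))
  | [] => []
  | x :: xs => pvGlue x (pvGroupBy xs)

def condense_masked_regions_alt (masked : List Int) : List (Int × Int) :=
  let groups := pvGroupBy (PySem.List.enumerate masked 0)
  groups.map (fun g => (g.headI.2, (g.getLastD (0, 0)).2 + 1))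

-- ===== PRECONDITION & SPEC =====
def Spec_condense_masked_regions (masked : List Int) (out : List (Int × Int)) : Prop := out = condense_masked_regions_alt masked
instance (masked : List Int) (out : List (Int × Int)) : Decidable (Spec_condense_masked_regions masked out) := by unfold Spec_condense_masked_regions; infer_instance

-- ===== CLAIM (what is proved, stated in full; the proofs are below) =====
def Claim_equal_condense_masked_regions : Prop := ∀ (masked : List Int), Dom_condense_masked_regions masked → Spec_condense_masked_regions masked (condense_masked_regions masked)

-- ===== LEMMAS AND PROOFS =====

-- common reference shape: on input prev :: xs both programs return (prev, goEnd prev xs) :: goRest prev xs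
def goEnd (prev : Int) : List Int → Int
  | [] => prev + 1
  | x :: xs => if prev + 1 = x then goEnd x xs else prev + 1

def goRest (prev : Int) : List Int → List (Int × Int)
  | [] => []
  | x :: xs => if prev + 1 = x then goRest x xs else (x, goEnd x xs) :: goRest x xs

-- A's index loop reads adjacent pairs: the mapped range is zip with the tail
lemma pairIdx (full : List Int) :
    (PySem.List.pyRange 0 ((full.length : Int) - 1) 1).map
      (fun i => (PySem.List.pyGetD full i 0, PySem.List.pyGetD full (i + 1) 0))
    = full.zip full.tail := by
  apply List.ext_getElem
  · simp [PySem.List.length_pyRange_one, List.length_zip, List.length_tail]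
  · intro k h1 h2
    have hlen : k + 1 < full.length := by
      simp [PySem.List.length_pyRange_one] at h1; omega
    have hr : (PySem.List.pyRange 0 ((full.length : Int) - 1) 1)[k]'(by simpa using h1) = (k : Int) := by
      simp [PySem.List.getElem_pyRange_one]
    simp only [List.getElem_map, hr, List.getElem_zip]
    rw [Prod.mk.injEq]
    constructor
    · rw [PySem.List.pyGetD_eq_getElem full 0 (by omega) (by exact_mod_cast Nat.lt_of_succ_lt hlen)]
      simp
    · have hc : (k : Int) + 1 = ((k + 1 : Nat) : Int) := by push_cast; ring
      rw [hc, PySem.List.pyGetD_eq_getElem full 0 (by omega) (by exact_mod_cast hlen)]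
      simp [List.getElem_tail]

-- A's fold over adjacent pairs, plus its final append, produces the reference shape
lemma goA (xs : List Int) : ∀ (prev s : Int) (acc : List (Int × Int)),
    (let st := ((prev :: xs).zip xs).foldl
        (fun (st : Int × List (Int × Int)) (p : Int × Int) =>
          if p.1 + 1 ≠ p.2 then (p.2, st.2 ++ [(st.1, p.1 + 1)]) else st) (s, acc);
     st.2 ++ [(st.1, xs.getLastD prev + 1)])
    = acc ++ (s, goEnd prev xs) :: goRest prev xs := by
  induction xs with
  | nil => intro prev s acc; simp [goEnd, goRest]
  | cons x xs ih =>
    intro prev s acc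
    simp only [List.zip_cons_cons, List.foldl_cons, List.getLastD_cons]
    by_cases h : prev + 1 = x
    · simp only [h, ne_eq, not_true_eq_false, if_false]
      simpa [goEnd, goRest, h] using ih x s acc
    · simp only [if_pos (by simpa using h)]
      simpa [goEnd, goRest, h] using ih x x (acc ++ [(s, prev + 1)])

-- pvGroupBy of an enumeration of a nonempty list starts with a group headed by the first entry
lemma gbHead (xs : List Int) : ∀ (i prev : Int), ∃ g gs,
    pvGroupBy (PySem.List.enumerate (prev :: xs) i) = ((i, prev) :: g) :: gs := by
  induction xs with
  | nil => intro i prev; exact ⟨[], [], by simp [PySem.List.enumerate_cons, PySem.List.enumerate_nil, pvGroupBy, pvGlue]⟩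
  | cons x xs ih =>
    intro i prev
    obtain ⟨g, gs, hg⟩ := ih (i + 1) x
    simp only [PySem.List.enumerate_cons] at hg ⊢
    rw [pvGroupBy, hg]
    by_cases h : prev - i = x - (i + 1)
    · exact ⟨(i + 1, x) :: g, gs, by simp [pvGlue, h]⟩
    · exact ⟨[], ((i + 1, x) :: g) :: gs, by simp [pvGlue, h]⟩

-- B's grouped-and-mapped output equals the reference shape
lemma goB (xs : List Int) : ∀ (i prev : Int),
    (pvGroupBy (PySem.List.enumerate (prev :: xs) i)).map
      (fun g => (g.headI.2, (g.getLastD (0, 0)).2 + 1))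
    = (prev, goEnd prev xs) :: goRest prev xs := by
  induction xs with
  | nil =>
    intro i prev
    simp [PySem.List.enumerate_cons, PySem.List.enumerate_nil, pvGroupBy, pvGlue, goEnd, goRest]
  | cons x xs ih =>
    intro i prev
    obtain ⟨g, gs, hg⟩ := gbHead xs (i + 1) x
    have IH := ih (i + 1) x
    rw [hg] at IH
    simp only [List.map_cons, List.cons.injEq] at IH
    obtain ⟨h1, h2⟩ := IH
    rw [Prod.mk.injEq] at h1
    simp only [PySem.List.enumerate_cons] at hg ⊢
    rw [pvGroupBy, hg]
    by_cases h : prev + 1 = x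
    · have hk : (i, prev).2 - (i, prev).1 = (i + 1, x).2 - (i + 1, x).1 := by simp; omega
      rw [show pvGlue (i, prev) (((i + 1, x) :: g) :: gs) = ((i, prev) :: (i + 1, x) :: g) :: gs from by simp [pvGlue, hk]]
      simp only [List.map_cons, goEnd, goRest, if_pos h, List.cons.injEq]
      refine ⟨?_, h2⟩
      rw [Prod.mk.injEq]
      refine ⟨by simp, ?_⟩
      rw [show (((i, prev) :: (i + 1, x) :: g).getLastD (0, 0)) = (((i + 1, x) :: g).getLastD (0, 0)) from by simp]
      exact h1.2
    · have hk : ¬ ((i, prev).2 - (i, prev).1 = (i + 1, x).2 - (i + 1, x).1) := by simp; omega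
      rw [show pvGlue (i, prev) (((i + 1, x) :: g) :: gs) = [(i, prev)] :: ((i + 1, x) :: g) :: gs from by simp [pvGlue, hk]]
      simp only [List.map_cons, goEnd, goRest, if_neg h, List.cons.injEq]
      refine ⟨by simp, ?_, h2⟩
      rw [Prod.mk.injEq]
      exact ⟨by simp, by simpa using h1.2⟩

-- masked[-1] of prev :: xs is the default-carrying last element
lemma lastNeg (xs : List Int) : ∀ (prev : Int),
    PySem.List.pyGetD (prev :: xs) (-1) 0 = xs.getLastD prev := by
  induction xs with
  | nil => intro prev; rw [PySem.List.pyGetD_neg_one [prev] 0 (by simp)]; simp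
  | cons y ys ihy =>
    intro prev
    rw [PySem.List.pyGetD_neg_one (prev :: y :: ys) 0 (by simp), List.getLast_cons (by simp),
        List.getLastD_cons, ← PySem.List.pyGetD_neg_one (y :: ys) 0 (by simp)]
    exact ihy y

-- ===== VERDICT (by name: the statement is the Claim_ definition above) =====
theorem condense_masked_regions_spec : Claim_equal_condense_masked_regions := by
  intro masked _
  unfold Spec_condense_masked_regions condense_masked_regions condense_masked_regions_alt
  cases masked with
  | nil => simp [PySem.List.enumerate_nil, pvGroupBy]  -- A: length 0 branch; B: no groups
  | cons prev xs =>
    rw [goB xs 0 prev]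
    simp only [List.length_cons, Nat.succ_ne_zero, if_false, PySem.List.pyGetD_zero_cons, lastNeg]
    rw [show ((xs.length + 1 : Nat) : Int) - 1 = (((prev :: xs).length : Nat) : Int) - 1 from by simp]
    have hfold : (PySem.List.pyRange 0 (((prev :: xs).length : Int) - 1) 1).foldl
        (fun (st : Int × List (Int × Int)) (i : Int) =>
          if PySem.List.pyGetD (prev :: xs) i 0 + 1 ≠ PySem.List.pyGetD (prev :: xs) (i + 1) 0
          then (PySem.List.pyGetD (prev :: xs) (i + 1) 0, st.2 ++ [(st.1, PySem.List.pyGetD (prev :: xs) i 0 + 1)])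
          else st)
        (prev, ([] : List (Int × Int)))
      = ((prev :: xs).zip xs).foldl
        (fun (st : Int × List (Int × Int)) (p : Int × Int) =>
          if p.1 + 1 ≠ p.2 then (p.2, st.2 ++ [(st.1, p.1 + 1)]) else st)
        (prev, ([] : List (Int × Int))) := by
      rw [show (prev :: xs).zip xs = (prev :: xs).zip (prev :: xs).tail from rfl]
      rw [← pairIdx (prev :: xs), List.foldl_map]
    rw [hfold]
    simpa using goA xs prev prev []
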